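-- pv_equiv track=rewrite | github.com/oksentiukpn/Dm_lab | Lab2_graphs/p2.py | adjacency_dict_radius
-- ===== SOURCE A (Python) =====
-- def adjacency_dict_radius(graph: dict[int, list[int]]) -> int:
--     """
--     :param dict[int, list[int]] graph: the adjacency list of a given graph
--     :returns int: the radius of the graph
--     >>> adjacency_dict_radius({0: [1, 2], 1: [0, 2], 2: [0, 1]})
--     1
--     >>> adjacency_dict_radius({0: [1, 2], 1: [0, 2, 3], 2: [0, 1], 3: [1]})
--     1
--     """
--     def breadth_first_search(graph: dict, vertex) -> dict:
--         queue = [vertex]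
--         order = 0
--         eccentricities = {vertex: 0}
--
--         while order < len(queue):
--             vertex = queue[order]
--             order += 1
--
--             for adjacent_vertex in graph[vertex]:
--                 if adjacent_vertex not in eccentricities:
--                     eccentricities[adjacent_vertex] = eccentricities[vertex] + 1
--                     queue.append(adjacent_vertex)
--
--         return eccentricities
--
--     all_eccentricities = []
--     for vertex in graph:
--         all_eccentricities.append(max((breadth_first_search(graph, vertex)).values()))
--
--     radius = min(all_eccentricities)
--
--     return radius
-- ===== SOURCE B (Python) =====
-- def adjacency_dict_radius(graph: dict[int, list[int]]) -> int:
--     """Radius via level-by-level frontier expansion: per source keep only a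
--     visited set and a level counter (no distance dict, no max pass)."""
--     def eccentricity(source) -> int:
--         seen = {source}
--         frontier = [source]
--         distance = 0
--         while True:
--             nxt = []
--             for u in frontier:
--                 for w in graph[u]:
--                     if w not in seen:
--                         seen.add(w)
--                         nxt.append(w)
--             if not nxt:
--                 return distance
--             distance += 1
--             frontier = nxt
--
--     return min(eccentricity(v) for v in graph)
-- ===== Notes on version B (the rewrite author's own statement) =====
-- stated objective: alternative
-- what changed: Per-source queue BFS that builds a distance dict and then takes max of its values is replaced by level-synchronous frontier expansion that maintains only a visited set and a level counter and returns the counter directly (no distance dict, no max pass).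
-- outside the precondition, e.g. on adjacency_dict_radius({}): A raises ValueError, B raises ValueError
import Mathlib
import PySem

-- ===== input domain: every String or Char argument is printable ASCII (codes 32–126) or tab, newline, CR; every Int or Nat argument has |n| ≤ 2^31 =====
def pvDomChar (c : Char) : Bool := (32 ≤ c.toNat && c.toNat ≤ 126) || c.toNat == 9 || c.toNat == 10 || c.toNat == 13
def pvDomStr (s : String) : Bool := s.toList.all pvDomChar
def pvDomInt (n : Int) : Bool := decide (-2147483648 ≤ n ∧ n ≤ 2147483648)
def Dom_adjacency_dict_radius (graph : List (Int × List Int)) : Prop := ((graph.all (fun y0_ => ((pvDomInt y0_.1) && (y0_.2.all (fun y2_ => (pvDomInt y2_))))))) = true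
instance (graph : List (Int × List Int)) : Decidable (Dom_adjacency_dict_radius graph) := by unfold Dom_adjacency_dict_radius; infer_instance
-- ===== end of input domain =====

-- B replaces per-source queue BFS (distance dict + max of values) by level-synchronous
-- frontier expansion keeping only a visited set and a level counter (objective: alternative).

-- ===== PORT A =====
-- body of A's inner `for adjacent_vertex in graph[vertex]` loop (state = (eccentricities, appended-part of queue))
def pvA_relax (v : Int) (st : PySem.Dict Int Int × List Int) (w : Int) : PySem.Dict Int Int × List Int :=
  if st.1.contains w then st
  else (st.1.insert w ((st.1.get? v).getD 0 + 1), st.2 ++ [w])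

-- A's while loop: the (queue, order) pair is represented by the unprocessed suffix `pending`
-- (queue.append = append to pending).  The fuel argument only makes the loop total; on inputs
-- satisfying Pre_ it is never exhausted (part of the equivalence proof).
-- `(g.get? v).getD []` / `.getD 0` are exact under Pre_: Python's graph[vertex] /
-- eccentricities[vertex] raise on a missing key, and Pre_ excludes exactly those inputs.
def bfsA (g : PySem.Dict Int (List Int)) : Nat → PySem.Dict Int Int → List Int → PySem.Dict Int Int
  | _, ecc, [] => ecc
  | 0, ecc, _ :: _ => ecc
  | fuel + 1, ecc, v :: rest =>
      let st := ((g.get? v).getD []).foldl (pvA_relax v) (ecc, [])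
      bfsA g fuel st.1 (rest ++ st.2)

def adjacency_dict_radius (graph : List (Int × List Int)) : Int :=
  let g := PySem.Dict.ofList graph
  let all_eccentricities := g.keys.map (fun v =>
    (PySem.List.max? (bfsA g (g.size + 1) ((PySem.Dict.empty).insert v 0) [v]).values (fun x => x)).getD 0)
  (PySem.List.min? all_eccentricities (fun x => x)).getD 0

-- ===== PORT B =====
-- body of B's inner `for w in graph[u]` loop (state = (seen, nxt))
def pvB_relax (st : PySem.Set Int × List Int) (w : Int) : PySem.Set Int × List Int :=
  if PySem.Set.contains st.1 w then st
  else (PySem.Set.add st.1 w, st.2 ++ [w])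

-- B's `for u in frontier` round body
def pvB_visit (g : PySem.Dict Int (List Int)) (st : PySem.Set Int × List Int) (u : Int) :
    PySem.Set Int × List Int :=
  ((g.get? u).getD []).foldl pvB_relax st

-- B's while loop (fuel makes it total; never exhausted under Pre_)
def bfsLevel (g : PySem.Dict Int (List Int)) : Nat → PySem.Set Int → List Int → Int → Int
  | 0, _, _, distance => distance
  | fuel + 1, seen, frontier, distance =>
      let st := frontier.foldl (pvB_visit g) (seen, [])
      if st.2 = [] then distance
      else bfsLevel g fuel st.1 st.2 (distance + 1)

def adjacency_dict_radius_alt (graph : List (Int × List Int)) : Int :=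
  let g := PySem.Dict.ofList graph
  (PySem.List.min? (g.keys.map (fun v => bfsLevel g (g.size + 1) (PySem.Set.ofList [v]) [v] 0))
    (fun x => x)).getD 0

-- ===== PRECONDITION & SPEC =====
-- Pre_ = exactly the inputs where Python A returns: the graph (as a dict) is nonempty
-- (min([]) raises ValueError) and every listed neighbour is itself a key (otherwise the
-- BFS from that neighbour's source reaches it and graph[w] raises KeyError).
def Pre_adjacency_dict_radius (graph : List (Int × List Int)) : Prop :=
  graph ≠ [] ∧ ∀ p ∈ (PySem.Dict.ofList graph).items, ∀ w ∈ p.2,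
    (PySem.Dict.ofList graph).contains w = true
instance (graph : List (Int × List Int)) : Decidable (Pre_adjacency_dict_radius graph) := by
  unfold Pre_adjacency_dict_radius; infer_instance
def pvWitness_adjacency_dict_radius : (List (Int × List Int)) := [(0, [1]), (1, [0]), (2, [])]

def Spec_adjacency_dict_radius (graph : List (Int × List Int)) (out : Int) : Prop := out = adjacency_dict_radius_alt graph
instance (graph : List (Int × List Int)) (out : Int) : Decidable (Spec_adjacency_dict_radius graph out) := by unfold Spec_adjacency_dict_radius; infer_instance

-- ===== CLAIM (what is proved, stated in full; the proofs are below) =====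
def Claim_equal_adjacency_dict_radius : Prop := ∀ (graph : List (Int × List Int)), Dom_adjacency_dict_radius graph → Pre_adjacency_dict_radius graph → Spec_adjacency_dict_radius graph (adjacency_dict_radius graph)

-- ===== LEMMAS AND PROOFS =====
lemma relax_sim (v d : Int) (ns : List Int) :
    ∀ (ecc : PySem.Dict Int Int) (accA accB : List Int),
    ecc.get? v = some d →
    ∃ E newl,
      ns.foldl (pvA_relax v) (ecc, accA) = (E, accA ++ newl) ∧
      ns.foldl pvB_relax (ecc.keys, accB) = (ecc.keys ++ newl, accB ++ newl) ∧
      (∀ u, E.get? u = if u ∈ newl then some (d + 1) else ecc.get? u) ∧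
      E.keys = ecc.keys ++ newl ∧
      E.values = ecc.values ++ newl.map (fun _ => d + 1) ∧
      (∀ u ∈ newl, u ∈ ns) ∧
      (∀ u ∈ newl, u ∉ ecc.keys) ∧
      (ecc.keys.Nodup → E.keys.Nodup) := by
  induction ns with
  | nil =>
    intro ecc accA accB _
    exact ⟨ecc, [], by simp, by simp, by simp, by simp, by simp, by simp, by simp, fun h => h⟩
  | cons w t ih =>
    intro ecc accA accB hv
    have hvmem : v ∈ ecc.keys := by
      by_contra hvm
      rw [(PySem.Dict.get?_eq_none_iff_not_mem_keys ecc v).mpr hvm] at hv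
      simp at hv
    by_cases hw : w ∈ ecc.keys
    · have hcA : ecc.contains w = true := (PySem.Dict.contains_iff_mem_keys ecc w).mpr hw
      have hcB : PySem.Set.contains ecc.keys w = true := (PySem.Set.contains_iff ecc.keys w).mpr hw
      simp only [List.foldl_cons, pvA_relax, pvB_relax, hcA, hcB, if_true]
      obtain ⟨E, newl, h1, h2, h3, h4, h5, h6, h7, h8⟩ := ih ecc accA accB hv
      exact ⟨E, newl, h1, h2, h3, h4, h5, fun u hu => List.mem_cons_of_mem _ (h6 u hu), h7, h8⟩
    · have hcA : ecc.contains w = false := by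
        rw [← Bool.not_eq_true]; intro hc; exact hw ((PySem.Dict.contains_iff_mem_keys ecc w).mp hc)
      have hcB : PySem.Set.contains ecc.keys w = false := by
        rw [← Bool.not_eq_true]; intro hc; exact hw ((PySem.Set.contains_iff ecc.keys w).mp hc)
      have hvw : v ≠ w := fun h => hw (h ▸ hvmem)
      have hstep : pvA_relax v (ecc, accA) w = (ecc.insert w (d + 1), accA ++ [w]) := by
        simp [pvA_relax, hcA, hv]
      have hstepB : pvB_relax (ecc.keys, accB) w = (ecc.keys ++ [w], accB ++ [w]) := by
        simp [pvB_relax, PySem.Set.add, hw]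
      have hkeys' : (ecc.insert w (d + 1)).keys = ecc.keys ++ [w] :=
        PySem.Dict.keys_insert_of_not_contains ecc _ hcA
      have hitems' : (ecc.insert w (d + 1)).items = ecc.items ++ [(w, d + 1)] :=
        PySem.Dict.items_insert_of_not_contains ecc _ hcA
      have hvals' : (ecc.insert w (d + 1)).values = ecc.values ++ [d + 1] := by
        simp [PySem.Dict.values, hitems']
      have hv' : (ecc.insert w (d + 1)).get? v = some d := by
        rw [PySem.Dict.get?_insert_of_ne ecc _ hvw]; exact hv
      obtain ⟨E, newl, h1, h2, h3, h4, h5, h6, h7, h8⟩ :=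
        ih (ecc.insert w (d + 1)) (accA ++ [w]) (accB ++ [w]) hv'
      have hwnew : w ∉ newl := fun hmem => (h7 w hmem) (by simp [hkeys'])
      refine ⟨E, w :: newl, ?_, ?_, ?_, ?_, ?_, ?_, ?_, ?_⟩
      · rw [List.foldl_cons, hstep, h1]; simp
      · rw [List.foldl_cons, hstepB, ← hkeys', h2, hkeys']; simp
      · intro u
        rcases eq_or_ne u w with rfl | huw
        · simp [h3, hwnew, PySem.Dict.get?_insert_self]
        · rw [h3 u]
          by_cases hun : u ∈ newl
          · simp [hun, huw]
          · simp [hun, huw, PySem.Dict.get?_insert_of_ne ecc _ huw]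
      · rw [h4, hkeys']; simp
      · rw [h5, hvals']; simp
      · intro u hu
        rcases List.mem_cons.mp hu with rfl | hu'
        · exact List.mem_cons_self
        · exact List.mem_cons_of_mem _ (h6 u hu')
      · intro u hu
        rcases List.mem_cons.mp hu with rfl | hu'
        · exact hw
        · intro hmem
          exact h7 u hu' (by simp [hkeys', hmem])
      · intro hnd
        exact h8 (by apply PySem.Dict.nodup_keys_insert; exact hnd)
lemma round_sim (g : PySem.Dict Int (List Int))
    (Hcl : ∀ v ns, g.get? v = some ns → ∀ w ∈ ns, w ∈ g.keys) (d : Int) :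
    ∀ (frontier : List Int) (fuel : Nat) (ecc : PySem.Dict Int Int) (acc accB : List Int),
    (∀ u ∈ frontier, ecc.get? u = some d) →
    ∃ E newl,
      bfsA g (fuel + frontier.length) ecc (frontier ++ acc) = bfsA g fuel E (acc ++ newl) ∧
      frontier.foldl (pvB_visit g) (ecc.keys, accB) = (ecc.keys ++ newl, accB ++ newl) ∧
      (∀ u, E.get? u = if u ∈ newl then some (d + 1) else ecc.get? u) ∧
      E.keys = ecc.keys ++ newl ∧
      E.values = ecc.values ++ newl.map (fun _ => d + 1) ∧
      (∀ u ∈ newl, u ∈ g.keys) ∧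
      (∀ u ∈ newl, u ∉ ecc.keys) ∧
      (ecc.keys.Nodup → E.keys.Nodup) := by
  intro frontier
  induction frontier with
  | nil =>
    intro fuel ecc acc accB _
    exact ⟨ecc, [], by simp, by simp, by simp, by simp, by simp, by simp, by simp, fun h => h⟩
  | cons v rest ih =>
    intro fuel ecc acc accB hv
    have hvd : ecc.get? v = some d := hv v List.mem_cons_self
    obtain ⟨E1, newl1, a1, b1, c1, k1, v1, m1, n1, nd1⟩ :=
      relax_sim v d ((g.get? v).getD []) ecc [] accB hvd
    have hrest : ∀ u ∈ rest, E1.get? u = some d := by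
      intro u hu
      have hud : ecc.get? u = some d := hv u (List.mem_cons_of_mem _ hu)
      have humem : u ∈ ecc.keys := by
        by_contra hx
        rw [(PySem.Dict.get?_eq_none_iff_not_mem_keys ecc u).mpr hx] at hud; simp at hud
      have hun : u ∉ newl1 := fun hx => n1 u hx humem
      rw [c1 u]; simp [hun, hud]
    obtain ⟨E, newl2, a2, b2, c2, k2, v2, m2, n2, nd2⟩ :=
      ih fuel E1 (acc ++ newl1) (accB ++ newl1) hrest
    refine ⟨E, newl1 ++ newl2, ?_, ?_, ?_, ?_, ?_, ?_, ?_, ?_⟩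
    · have hfe : fuel + (v :: rest).length = (fuel + rest.length) + 1 := by
        simp [List.length_cons]; omega
      rw [hfe]
      show bfsA g ((fuel + rest.length) + 1) ecc ((v :: rest) ++ acc) = _
      simp only [List.cons_append, bfsA, a1]
      rw [show ((rest ++ acc) ++ ([] ++ newl1)) = rest ++ (acc ++ newl1) by simp]
      rw [a2]
      simp [List.append_assoc]
    · rw [List.foldl_cons]
      have hb1 : pvB_visit g (ecc.keys, accB) v = (ecc.keys ++ newl1, accB ++ newl1) := by
        simpa [pvB_visit] using b1
      rw [hb1, ← k1, b2, k1]
      simp [List.append_assoc]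
    · intro u
      rw [c2 u, c1 u]
      by_cases h2 : u ∈ newl2
      · simp [h2]
      · by_cases h1 : u ∈ newl1 <;> simp [h1, h2]
    · rw [k2, k1]; simp [List.append_assoc]
    · rw [v2, v1]; simp [List.append_assoc]
    · intro u hu
      rcases List.mem_append.mp hu with h1 | h2
      · have hns := m1 u h1
        cases hg : g.get? v with
        | none => rw [hg] at hns; simp at hns
        | some ns0 => rw [hg] at hns; exact Hcl v ns0 hg u hns
      · exact m2 u h2
    · intro u hu
      rcases List.mem_append.mp hu with h1 | h2
      · exact n1 u h1
      · intro hx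
        exact n2 u h2 (by rw [k1]; exact List.mem_append.mpr (Or.inl hx))
    · exact fun h => nd2 (nd1 h)
lemma bfs_sim (g : PySem.Dict Int (List Int))
    (Hcl : ∀ v ns, g.get? v = some ns → ∀ w ∈ ns, w ∈ g.keys) :
    ∀ (fuelB fuelA : Nat) (frontier : List Int) (ecc : PySem.Dict Int Int) (d : Int),
    (∀ u ∈ frontier, ecc.get? u = some d) →
    (∀ x ∈ ecc.values, x ≤ d) → d ∈ ecc.values →
    ecc.keys.Nodup → (∀ u ∈ ecc.keys, u ∈ g.keys) →
    g.size + frontier.length ≤ fuelA + ecc.keys.length →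
    g.size + 1 ≤ fuelB + ecc.keys.length →
    (PySem.List.max? (bfsA g fuelA ecc frontier).values (fun x => x)).getD 0 =
      bfsLevel g fuelB ecc.keys frontier d := by
  intro fuelB
  induction fuelB with
  | zero =>
    intro fuelA frontier ecc d hv hle hd hnd hsub hA hB
    exfalso
    have h1 : ecc.keys.length ≤ g.keys.length := (List.subperm_of_subset hnd hsub).length_le
    have h2 : g.size = g.keys.length := by simp [PySem.Dict.size, PySem.Dict.keys]
    omega
  | succ fuelB ih =>
    intro fuelA frontier ecc d hv hle hd hnd hsub hA hB
    have hszk : g.size = g.keys.length := by simp [PySem.Dict.size, PySem.Dict.keys]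
    have hkle : ecc.keys.length ≤ g.keys.length := (List.subperm_of_subset hnd hsub).length_le
    obtain ⟨fuel', rfl⟩ : ∃ f, fuelA = f + frontier.length :=
      ⟨fuelA - frontier.length, by omega⟩
    obtain ⟨E, newl, a1, b1, c1, k1, v1, m1, n1, nd1⟩ :=
      round_sim g Hcl d frontier fuel' ecc [] [] hv
    rw [List.append_nil] at a1
    rw [a1]
    show _ = bfsLevel g (fuelB + 1) ecc.keys frontier d
    simp only [bfsLevel, b1, List.nil_append]
    by_cases hnl : newl = []
    · subst hnl
      have hAend : bfsA g fuel' E [] = E := by cases fuel' <;> simp [bfsA]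
      rw [if_pos rfl, hAend]
      have hvalE : E.values = ecc.values := by simpa using v1
      rw [hvalE]
      have hvne : ecc.values ≠ [] := by intro h; rw [h] at hd; simp at hd
      obtain ⟨m, hm⟩ : ∃ m, PySem.List.max? ecc.values (fun x => x) = some m := by
        cases hmx : PySem.List.max? ecc.values (fun x => x) with
        | none => exact absurd ((PySem.List.max?_eq_none_iff _ _).mp hmx) hvne
        | some m => exact ⟨m, rfl⟩
      have h1 : m ≤ d := hle m (PySem.List.max?_mem hm)
      have h2 : d ≤ m := PySem.List.max?_isMax hm d hd
      rw [hm]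
      simp
      omega
    · rw [if_neg hnl]
      have hv' : ∀ u ∈ newl, E.get? u = some (d + 1) := by
        intro u hu; rw [c1 u]; simp [hu]
      have hle' : ∀ x ∈ E.values, x ≤ d + 1 := by
        intro x hx
        rw [v1] at hx
        rcases List.mem_append.mp hx with h | h
        · have := hle x h; omega
        · obtain ⟨u, _, rfl⟩ := List.mem_map.mp h; omega
      have hd' : (d + 1) ∈ E.values := by
        rw [v1]
        refine List.mem_append.mpr (Or.inr ?_)
        obtain ⟨u, hu⟩ := List.exists_mem_of_ne_nil newl hnl
        exact List.mem_map.mpr ⟨u, hu, rfl⟩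
      have hsub' : ∀ u ∈ E.keys, u ∈ g.keys := by
        intro u hu
        rw [k1] at hu
        rcases List.mem_append.mp hu with h | h
        · exact hsub u h
        · exact m1 u h
      have hklen : E.keys.length = ecc.keys.length + newl.length := by
        rw [k1]; simp
      have hnlpos : 1 ≤ newl.length := List.length_pos_iff.mpr hnl
      have := ih fuel' newl E (d + 1) hv' hle' hd' (nd1 hnd) hsub'
        (by omega) (by omega)
      rw [this, k1]
-- ===== VERDICT (by name: the statement is the Claim_ definition above) =====
theorem adjacency_dict_radius_spec : Claim_equal_adjacency_dict_radius := by
  intro graph _ hpre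
  obtain ⟨hne, hclosed⟩ := hpre
  unfold Spec_adjacency_dict_radius adjacency_dict_radius adjacency_dict_radius_alt
  simp only []
  have Hcl : ∀ v ns, (PySem.Dict.ofList graph).get? v = some ns →
      ∀ w ∈ ns, w ∈ (PySem.Dict.ofList graph).keys := by
    intro v ns hvn w hw
    exact (PySem.Dict.contains_iff_mem_keys _ w).mp
      (hclosed (v, ns) (PySem.Dict.mem_items_of_get?_eq_some _ hvn) w hw)
  congr 1
  congr 1
  apply List.map_congr_left
  intro v hvK
  have hce : (PySem.Dict.empty : PySem.Dict Int Int).contains v = false := by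
    simp [PySem.Dict.contains_empty]
  have hkeys : ((PySem.Dict.empty : PySem.Dict Int Int).insert v 0).keys = [v] := by
    rw [PySem.Dict.keys_insert_of_not_contains _ _ hce]
    simp [PySem.Dict.keys_empty]
  have hitems : ((PySem.Dict.empty : PySem.Dict Int Int).insert v 0).items = [(v, 0)] := by
    rw [PySem.Dict.items_insert_of_not_contains _ _ hce]
    rfl
  have hvals : ((PySem.Dict.empty : PySem.Dict Int Int).insert v 0).values = [0] := by
    simp [PySem.Dict.values, hitems]
  have hset : (PySem.Set.ofList [v] : PySem.Set Int) = [v] := by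
    simp [PySem.Set.ofList_eq_self_of_nodup]
  have := bfs_sim (PySem.Dict.ofList graph) Hcl
    ((PySem.Dict.ofList graph).size + 1) ((PySem.Dict.ofList graph).size + 1)
    [v] ((PySem.Dict.empty : PySem.Dict Int Int).insert v 0) 0
    (by intro u hu; rw [List.mem_singleton.mp hu]; exact PySem.Dict.get?_insert_self _ _ _)
    (by intro x hx; rw [hvals] at hx; simp at hx; omega)
    (by rw [hvals]; simp)
    (by rw [hkeys]; simp)
    (by intro u hu; rw [hkeys] at hu; rw [List.mem_singleton.mp hu]; exact hvK)
    (by rw [hkeys]; simp)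
    (by rw [hkeys]; simp)
  rw [this, hkeys, hset]
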